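-- pv_equiv track=rewrite | github.com/pypi-data/pypi-mirror-398 | packages/biencrypt/biencrypt-1.0.0-py3-none-any.whl/biencrypt_lib.py | adjacent_encrypt
-- ===== SOURCE A (Python) =====
-- def adjacent_encrypt(text, seed=0):
--     """
--     Encrypts text by swapping adjacent character pairs with optional rotation.
--
--     Args:
--         text (str): Plain text to encrypt
--         seed (int): Optional seed for rotation (default: 0)
--
--     Returns:
--         str: Encrypted text
--     """
--     if not text:
--         return ""
--
--     chars = list(text)
--
--     try:
--         n = int(seed)
--     except Exception:
--         n = 0
--
--     length = len(chars)
--     rot = (n % length) if length > 0 else 0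
--
--     # Rotate right by rot
--     if rot:
--         chars = chars[-rot:] + chars[:-rot]
--
--     # Swap adjacent pairs
--     for i in range(0, len(chars) - 1, 2):
--         chars[i], chars[i + 1] = chars[i + 1], chars[i]
--
--     return ''.join(chars)
-- ===== SOURCE B (Python) =====
-- def adjacent_encrypt(text, seed=0):
--     """Single-pass re-implementation: each output position pulls its character
--     directly from the original text through the combined swap+rotation index map."""
--     if not text:
--         return ""
--     length = len(text)
--     try:
--         n = int(seed)
--     except Exception:
--         n = 0
--     rot = n % length
--
--     def src(i):
--         if i % 2 == 1:
--             p = i - 1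
--         elif i + 1 < length:
--             p = i + 1
--         else:
--             p = i
--         return text[(p - rot) % length]
--
--     return ''.join(src(i) for i in range(length))
-- ===== Notes on version B (the rewrite author's own statement) =====
-- stated objective: simpler
-- what changed: Replaces the rotate-into-a-new-list-then-in-place-pair-swap two-phase algorithm with a single pass that reads each output character straight from the original text via the combined partner+rotation index permutation.
import Mathlib
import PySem

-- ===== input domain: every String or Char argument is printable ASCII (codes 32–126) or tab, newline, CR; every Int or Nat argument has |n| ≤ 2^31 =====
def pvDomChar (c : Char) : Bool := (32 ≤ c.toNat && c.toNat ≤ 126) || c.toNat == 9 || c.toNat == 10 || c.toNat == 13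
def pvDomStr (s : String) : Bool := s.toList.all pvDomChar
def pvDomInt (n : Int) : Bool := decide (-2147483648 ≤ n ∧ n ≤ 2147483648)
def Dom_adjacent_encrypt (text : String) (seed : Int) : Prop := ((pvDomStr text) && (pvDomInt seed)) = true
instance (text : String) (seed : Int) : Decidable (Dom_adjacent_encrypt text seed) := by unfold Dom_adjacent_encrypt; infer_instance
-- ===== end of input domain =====

-- B computes A's rotate-then-swap output in one pass via a direct index permutation (objective: simpler).

-- ===== PORT A =====
-- the in-place loop 'for i in range(0, len(chars)-1, 2): chars[i], chars[i+1] = chars[i+1], chars[i]'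
-- as a structural recursion over the same index and list state (both indices are in range when the swap fires)
def pvSwapLoop (cs : List Char) (i : Nat) : List Char :=
  if h : i + 1 < cs.length then
    pvSwapLoop ((cs.set i (cs[i+1]'h)).set (i+1) (cs[i]'(by omega))) (i + 2)
  else cs
termination_by cs.length - i
decreasing_by simp only [List.length_set]; omega

def adjacent_encrypt (text : String) (seed : Int) : String :=
  if text.toList = [] then "" else
  let chars := text.toList
  -- int(seed): seed is already an int, so the try/except never fires
  let n := seed
  let length : Int := (chars.length : Int)
  let rot : Int := if length > 0 then PySem.Int.mod n length else 0
  let chars := if rot ≠ 0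
    then PySem.List.slice chars (some (-rot)) none ++ PySem.List.slice chars none (some (-rot))
    else chars
  String.ofList (pvSwapLoop chars 0)

-- ===== PORT B =====
-- partner index p, then text[(p - rot) % length]; that index is a mod by length > 0, hence always
-- in [0, length), so getD with toNat is exact here (the default is never used, toNat never clamps)
def pvSrc (cs : List Char) (rot : Int) (i : Nat) : Char :=
  let length := cs.length
  let p : Int :=
    if i % 2 = 1 then (i : Int) - 1
    else if i + 1 < length then (i : Int) + 1
    else (i : Int)
  cs.getD (PySem.Int.mod (p - rot) (length : Int)).toNat ' '

def adjacent_encrypt_alt (text : String) (seed : Int) : String :=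
  if text.toList = [] then "" else
  let cs := text.toList
  let length := cs.length
  let rot : Int := PySem.Int.mod seed (length : Int)
  String.ofList ((List.range length).map (pvSrc cs rot))

-- ===== PRECONDITION & SPEC =====
def Spec_adjacent_encrypt (text : String) (seed : Int) (out : String) : Prop := out = adjacent_encrypt_alt text seed
instance (text : String) (seed : Int) (out : String) : Decidable (Spec_adjacent_encrypt text seed out) := by unfold Spec_adjacent_encrypt; infer_instance

-- ===== CLAIM (what is proved, stated in full; the proofs are below) =====
def Claim_equal_adjacent_encrypt : Prop := ∀ (text : String) (seed : Int), Dom_adjacent_encrypt text seed → Spec_adjacent_encrypt text seed (adjacent_encrypt text seed)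

-- ===== LEMMAS AND PROOFS =====

-- the index permutation the pair-swap loop realises on positions ≥ the current index
def pvP (n j : Nat) : Nat :=
  if j % 2 = 1 then j - 1 else if j + 1 < n then j + 1 else j

lemma pvP_lt {n j : Nat} (hj : j < n) : pvP n j < n := by
  unfold pvP; split_ifs <;> omega

lemma pvSwapLoop_length (cs : List Char) (i : Nat) : (pvSwapLoop cs i).length = cs.length := by
  fun_induction pvSwapLoop cs i with
  | case1 cs i h ih => rw [ih]; simp
  | case2 => rfl

lemma pvSwapLoop_getElem? (cs : List Char) (i : Nat) :
    i % 2 = 0 → ∀ j, j < cs.length →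
    (pvSwapLoop cs i)[j]? = if j < i then cs[j]? else cs[pvP cs.length j]? := by
  fun_induction pvSwapLoop cs i with
  | case1 cs i h ih =>
    intro hi j hj
    have hil : i < cs.length := by omega
    rw [ih (by omega) j (by simpa using hj)]
    simp only [List.length_set]
    by_cases hji : j < i
    · rw [if_pos (by omega), if_pos hji,
        List.getElem?_set_ne (by omega), List.getElem?_set_ne (by omega)]
    · by_cases hji2 : j < i + 2
      · rw [if_pos hji2, if_neg hji]
        by_cases hje : j = i
        · subst hje
          have hp : pvP cs.length j = j + 1 := by
            unfold pvP; rw [if_neg (by omega), if_pos h]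
          rw [hp, List.getElem?_set_ne (by omega), List.getElem?_set_self hil,
            List.getElem?_eq_getElem h]
        · have hje1 : j = i + 1 := by omega
          subst hje1
          have hp : pvP cs.length (i + 1) = i := by
            unfold pvP; rw [if_pos (by omega)]; omega
          rw [hp, List.getElem?_set_self (by simpa using h), List.getElem?_eq_getElem hil]
      · rw [if_neg (by omega), if_neg (by omega)]
        have hp2 : i + 2 ≤ pvP cs.length j := by unfold pvP; split_ifs <;> omega
        rw [List.getElem?_set_ne (by omega), List.getElem?_set_ne (by omega)]
  | case2 cs i h =>
    intro hi j hj
    by_cases hji : j < i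
    · rw [if_pos hji]
    · rw [if_neg hji]
      have hp : pvP cs.length j = j := by
        unfold pvP; rw [if_neg (by omega), if_neg (by omega)]
      rw [hp]

-- the combined index arithmetic: Python's (P - k) % n as a Nat, for 0 ≤ k < n and P < n
lemma pvIdx_eq (n P k : Nat) (hk : k < n) (hP : P < n) :
    (PySem.Int.mod ((P : Int) - (k : Int)) (n : Int)).toNat = (n - k + P) % n := by
  rw [PySem.Int.mod_eq_emod_of_pos (by omega)]
  by_cases h : k ≤ P
  · rw [Int.emod_eq_of_lt (by omega) (by omega)]
    have h2 : n - k + P = (P - k) + n := by omega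
    rw [h2, Nat.add_mod_right, Nat.mod_eq_of_lt (by omega)]
    omega
  · rw [Int.emod_eq_add_self_emod, Int.emod_eq_of_lt (by omega) (by omega),
      Nat.mod_eq_of_lt (by omega)]
    omega

theorem adjacent_encrypt_spec : Claim_equal_adjacent_encrypt := by
  unfold Claim_equal_adjacent_encrypt Spec_adjacent_encrypt
  intro text seed _
  by_cases htext : text.toList = []
  · simp [adjacent_encrypt, adjacent_encrypt_alt, htext]
  · simp only [adjacent_encrypt, adjacent_encrypt_alt, if_neg htext]
    set L := text.toList with hL
    set n := L.length with hn
    have hn0 : 0 < n := List.length_pos_iff.mpr htext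
    have hpos : (0 : Int) < (n : Int) := by exact_mod_cast hn0
    rw [if_pos hpos]
    set rot : Int := PySem.Int.mod seed (n : Int) with hrot
    have hr0 : 0 ≤ rot := PySem.Int.mod_nonneg seed hpos
    have hrn : rot < (n : Int) := PySem.Int.mod_lt seed hpos
    set k : Nat := rot.toNat with hk
    have hkr : rot = (k : Int) := by omega
    have hkn : k < n := by omega
    set R : List Char := if rot ≠ 0
      then PySem.List.slice L (some (-rot)) none ++ PySem.List.slice L none (some (-rot))
      else L with hR
    have hRlen : R.length = n := by
      rw [hR]; split
      · rw [hkr, PySem.List.slice_from_neg_natCast L k (by omega),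
          PySem.List.slice_to_neg_natCast L k (by omega)]
        simp only [List.length_append, List.length_drop, List.length_take]
        omega
      · rfl
    have hRrot : ∀ j, j < n → R[j]? = L[(n - k + j) % n]? := by
      intro j hj
      by_cases hz : rot = 0
      · rw [hR, if_neg (by simp [hz])]
        have hk0 : k = 0 := by omega
        rw [hk0, Nat.sub_zero, Nat.add_mod_left, Nat.mod_eq_of_lt hj]
      · rw [hR, if_pos hz, hkr,
          PySem.List.slice_from_neg_natCast L k (by omega),
          PySem.List.slice_to_neg_natCast L k (by omega),
          ← List.rotate_eq_drop_append_take (by omega)]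
        have hjlt : j < (L.rotate (n - k)).length := by rw [List.length_rotate, ← hn]; exact hj
        rw [List.getElem?_eq_getElem hjlt, List.getElem_rotate L (n - k) j hjlt]
        simp only [← hn, Nat.add_comm j (n - k)]
        have hlt2 : (n - k + j) % n < L.length := by rw [← hn]; exact Nat.mod_lt _ hn0
        rw [List.getElem?_eq_getElem hlt2]
    congr 1
    apply List.ext_getElem?
    intro j
    rcases Nat.lt_or_ge j n with hj | hj
    · rw [pvSwapLoop_getElem? R 0 rfl j (by omega), if_neg (by omega), hRlen,
        hRrot (pvP n j) (pvP_lt hj), List.getElem?_map, List.getElem?_range hj]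
      simp only [Option.map_some]
      simp only [pvSrc]
      rw [List.getElem?_eq_getElem (Nat.mod_lt _ (by omega))]
      congr 1
      have hp : (if j % 2 = 1 then (j : Int) - 1
          else if j + 1 < L.length then (j : Int) + 1 else (j : Int)) = ((pvP n j : Nat) : Int) := by
        unfold pvP
        rw [← hn]
        split_ifs with h1 h2 <;> omega
      rw [hp, hkr]
      simp only [← hn]
      rw [pvIdx_eq n (pvP n j) k hkn (pvP_lt hj)]
      have hlt3 : (n - k + pvP n j) % n < L.length := by rw [← hn]; exact Nat.mod_lt _ hn0
      rw [List.getD_eq_getElem L ' ' hlt3]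
    · rw [List.getElem?_eq_none (by rw [pvSwapLoop_length, hRlen]; omega),
        List.getElem?_eq_none (by simp; omega)]
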